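-- pv_equiv track=rewrite | github.com/Kibmeister/staffer-sims | services/proxy_client.py | _enforce_single_sentence
-- ===== SOURCE A (Python) =====
-- def _enforce_single_sentence(text: str) -> str:
--     """Trim reply to a single sentence for brevity and consistency."""
--     s = text.strip()
--     if not s:
--         return s
--     # Find first terminal punctuation. Prefer '?', '!' or '.'
--     first_q = s.find('?') if '?' in s else -1
--     first_e = s.find('!') if '!' in s else -1
--     first_p = s.find('.') if '.' in s else -1
--
--     candidates = [idx for idx in [first_q, first_e, first_p] if idx != -1]
--     if not candidates:
--         # No clear sentence boundary; return as-is but cap length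
--         return s[:240]
--     end = min(candidates)
--     single = s[: end + 1].strip()
--     return single
-- ===== SOURCE B (Python) =====
-- def _enforce_single_sentence(text: str) -> str:
--     """Trim reply to a single sentence: one left-to-right pass for the first terminal punctuation."""
--     s = text.strip()
--     if not s:
--         return s
--     end = next((i for i, c in enumerate(s) if c in '?!.'), None)
--     if end is None:
--         # No clear sentence boundary; return as-is but cap length
--         return s[:240]
--     return s[:end + 1].strip()
-- ===== Notes on version B (the rewrite author's own statement) =====
-- stated objective: simpler
-- what changed: Replaces the three separate membership/find scans plus list-building and min() with a single left-to-right enumerate pass that stops at the first terminal-punctuation character.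
import Mathlib
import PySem

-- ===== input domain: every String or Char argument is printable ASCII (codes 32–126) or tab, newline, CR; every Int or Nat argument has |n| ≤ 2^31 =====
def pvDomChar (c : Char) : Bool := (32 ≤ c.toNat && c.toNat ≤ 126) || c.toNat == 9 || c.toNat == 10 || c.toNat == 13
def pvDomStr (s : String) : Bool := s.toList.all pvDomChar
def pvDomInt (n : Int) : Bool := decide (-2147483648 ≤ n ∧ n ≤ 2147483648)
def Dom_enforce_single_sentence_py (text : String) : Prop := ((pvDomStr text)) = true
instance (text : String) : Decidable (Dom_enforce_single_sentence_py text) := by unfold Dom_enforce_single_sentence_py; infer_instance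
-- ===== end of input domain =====

-- B replaces A's three separate membership/find scans plus min() over a candidate list by one
-- left-to-right pass for the first character in '?!.' (objective: simpler).

-- ===== PORT A =====
def enforce_single_sentence_py (text : String) : String :=
  let s := PySem.Str.strip text
  if PySem.Str.len s = 0 then s
  else
    let first_q : Int := if PySem.Str.isIn "?" s then PySem.Str.find s "?" else -1
    let first_e : Int := if PySem.Str.isIn "!" s then PySem.Str.find s "!" else -1
    let first_p : Int := if PySem.Str.isIn "." s then PySem.Str.find s "." else -1
    let candidates := [first_q, first_e, first_p].filter (fun idx => idx != -1)
    if candidates.isEmpty then PySem.Str.slice s none (some 240)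
    else
      -- min(candidates); this branch guarantees candidates is nonempty, so getD's default is never used
      let e := (PySem.List.min? candidates (fun x => x)).getD (-1)
      PySem.Str.strip (PySem.Str.slice s none (some (e + 1)))

-- ===== PORT B =====
def enforce_single_sentence_py_alt (text : String) : String :=
  let s := PySem.Str.strip text
  if PySem.Str.len s = 0 then s
  else
    -- next((i for i, c in enumerate(s) if c in '?!.'), None)
    match s.toList.findIdx? (fun c => c == '?' || c == '!' || c == '.') with
    | none => PySem.Str.slice s none (some 240)
    | some i => PySem.Str.strip (PySem.Str.slice s none (some ((i : Int) + 1)))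

-- ===== PRECONDITION & SPEC =====
def Spec_enforce_single_sentence_py (text : String) (out : String) : Prop := out = enforce_single_sentence_py_alt text
instance (text : String) (out : String) : Decidable (Spec_enforce_single_sentence_py text out) := by unfold Spec_enforce_single_sentence_py; infer_instance

-- ===== CLAIM (what is proved, stated in full; the proofs are below) =====
def Claim_equal_enforce_single_sentence_py : Prop := ∀ (text : String), Dom_enforce_single_sentence_py text → Spec_enforce_single_sentence_py text (enforce_single_sentence_py text)

-- ===== LEMMAS AND PROOFS =====

lemma singleton_prefix_drop_iff (c : Char) (l : List Char) (i : Nat) :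
    [c] <+: l.drop i ↔ l[i]? = some c := by
  constructor
  · rintro ⟨t, ht⟩
    have h : (l.drop i).head? = some c := by rw [← ht]; rfl
    simpa [List.head?_drop] using h
  · intro h
    have h' : (l.drop i).head? = some c := by simpa [List.head?_drop] using h
    cases hd : l.drop i with
    | nil => simp [hd] at h'
    | cons a t => simp [hd] at h'; exact ⟨t, by simp [h']⟩

-- s.find(c) for a single character = j when c occurs at index j and nowhere earlier
lemma find_single_eq (l : List Char) (c : Char) (j : Nat)
    (h1 : l[j]? = some c) (h2 : ∀ k < j, l[k]? ≠ some c) :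
    PySem.Chars.find l [c] = (j : Int) := by
  have hc : c ∈ l := List.mem_of_getElem? h1
  have hnn : 0 ≤ PySem.Chars.find l [c] := by
    rw [PySem.Chars.find_nonneg_iff, List.singleton_infix_iff]; exact hc
  obtain ⟨hocc, hmin⟩ := PySem.Chars.find_spec hnn
  rw [singleton_prefix_drop_iff] at hocc
  set t := (PySem.Chars.find l [c]).toNat with ht
  have : t = j := by
    rcases lt_trichotomy t j with h | h | h
    · exact absurd hocc (h2 t h)
    · exact h
    · exact absurd ((singleton_prefix_drop_iff c l j).mpr h1) (hmin j h)
  omega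

lemma find_single_occ (l : List Char) (c : Char) (hc : c ∈ l) :
    0 ≤ PySem.Chars.find l [c] ∧ l[(PySem.Chars.find l [c]).toNat]? = some c := by
  have hnn : 0 ≤ PySem.Chars.find l [c] := by
    rw [PySem.Chars.find_nonneg_iff, List.singleton_infix_iff]; exact hc
  obtain ⟨hocc, -⟩ := PySem.Chars.find_spec hnn
  exact ⟨hnn, (singleton_prefix_drop_iff c l _).mp hocc⟩

-- when the single pass finds its first hit at j, A's candidate list is nonempty and its min is j
lemma main_some (cs : List Char) (j : Nat)
    (h : cs.findIdx? (fun c => c == '?' || c == '!' || c == '.') = some j) :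
    ([(if PySem.Chars.isIn ['?'] cs then PySem.Chars.find cs ['?'] else -1),
      (if PySem.Chars.isIn ['!'] cs then PySem.Chars.find cs ['!'] else -1),
      (if PySem.Chars.isIn ['.'] cs then PySem.Chars.find cs ['.'] else -1)].filter
        (fun idx => idx != -1)) ≠ [] ∧
    (PySem.List.min? ([(if PySem.Chars.isIn ['?'] cs then PySem.Chars.find cs ['?'] else -1),
      (if PySem.Chars.isIn ['!'] cs then PySem.Chars.find cs ['!'] else -1),
      (if PySem.Chars.isIn ['.'] cs then PySem.Chars.find cs ['.'] else -1)].filter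
        (fun idx => idx != -1)) (fun x => x)).getD (-1) = (j : Int) := by
  rw [List.findIdx?_eq_some_iff_getElem] at h
  obtain ⟨hj, hpj, hbefore⟩ := h
  set c0 := cs[j] with hc0
  have hc0mem : c0 ∈ cs := List.getElem_mem hj
  have hfind_c0 : PySem.Chars.find cs [c0] = (j : Int) := by
    apply find_single_eq _ _ _ (by rw [List.getElem?_eq_getElem hj])
    intro k hk hkc
    have hkl : k < cs.length := by omega
    have : cs[k] = c0 := by simpa [List.getElem?_eq_getElem hkl] using hkc
    exact hbefore k hk (by rw [this]; exact hpj)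
  have hge : ∀ c : Char, c ∈ cs → (c == '?' || c == '!' || c == '.') = true →
      (j : Int) ≤ PySem.Chars.find cs [c] := by
    intro c hcm hcp
    obtain ⟨hnn, hocc⟩ := find_single_occ cs c hcm
    set t := (PySem.Chars.find cs [c]).toNat with ht
    have htl : t < cs.length := by
      by_contra hh
      have hnone : cs[t]? = none := List.getElem?_eq_none_iff.mpr (by omega)
      rw [hnone] at hocc
      exact (by simp at hocc)
    have hct : cs[t] = c := by simpa [List.getElem?_eq_getElem htl] using hocc
    have hnlt : ¬ t < j := fun hlt => hbefore t hlt (by rw [hct]; exact hcp)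
    have htn := Int.toNat_of_nonneg hnn
    omega
  have hpj' : (c0 == '?' || c0 == '!' || c0 == '.') = true := hpj
  have hc0in : PySem.Chars.isIn [c0] cs = true := by
    rw [PySem.Chars.isIn_iff_infix, List.singleton_infix_iff]; exact hc0mem
  set fq : Int := (if PySem.Chars.isIn ['?'] cs then PySem.Chars.find cs ['?'] else -1) with hfq
  set fe : Int := (if PySem.Chars.isIn ['!'] cs then PySem.Chars.find cs ['!'] else -1) with hfe
  set fp : Int := (if PySem.Chars.isIn ['.'] cs then PySem.Chars.find cs ['.'] else -1) with hfp
  have hmemj : (j : Int) ∈ [fq, fe, fp] := by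
    simp only [Bool.or_eq_true, beq_iff_eq] at hpj'
    rcases hpj' with (h | h) | h <;>
      [ (have : fq = (j:Int) := by rw [hfq, if_pos (by rw [← h]; exact hc0in), ← h, hfind_c0]);
        (have : fe = (j:Int) := by rw [hfe, if_pos (by rw [← h]; exact hc0in), ← h, hfind_c0]);
        (have : fp = (j:Int) := by rw [hfp, if_pos (by rw [← h]; exact hc0in), ← h, hfind_c0]) ] <;>
      simp [← this]
  have hcand : ∀ x ∈ [fq, fe, fp], x ≠ -1 → (j : Int) ≤ x := by
    intro x hx hxne
    have hone : ∀ (ch : Char) (f : Int), f = (if PySem.Chars.isIn [ch] cs then PySem.Chars.find cs [ch] else -1) →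
        (ch == '?' || ch == '!' || ch == '.') = true → x = f → (j : Int) ≤ x := by
      intro ch f hf hchp hxf
      by_cases hin : PySem.Chars.isIn [ch] cs
      · subst hxf
        rw [hf, if_pos hin]
        exact hge ch (by rwa [PySem.Chars.isIn_iff_infix, List.singleton_infix_iff] at hin) hchp
      · exact absurd (by rw [hxf, hf, if_neg hin]) hxne
    rw [List.mem_cons, List.mem_cons, List.mem_singleton] at hx
    rcases hx with hx | hx | hx
    · exact hone '?' fq hfq (by decide) hx
    · exact hone '!' fe hfe (by decide) hx
    · exact hone '.' fp hfp (by decide) hx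
  set cands := [fq, fe, fp].filter (fun idx => idx != -1) with hcands
  have hjin : (j : Int) ∈ cands := by
    rw [hcands, List.mem_filter]
    exact ⟨hmemj, by simp⟩
  have hne : cands ≠ [] := fun hh => by simp [hh] at hjin
  refine ⟨hne, ?_⟩
  obtain ⟨m, hm⟩ : ∃ m, PySem.List.min? cands (fun x => x) = some m := by
    cases hmm : PySem.List.min? cands (fun x => x) with
    | none => exact absurd ((PySem.List.min?_eq_none_iff _ _).mp hmm) hne
    | some m => exact ⟨m, rfl⟩
  have hmmem := PySem.List.min?_mem hm
  have hmmin := PySem.List.min?_isMin hm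
  rw [hm]
  simp only [Option.getD_some]
  have h1 : (j : Int) ≤ m := by
    rw [hcands, List.mem_filter] at hmmem
    exact hcand m hmmem.1 (by simpa using hmmem.2)
  have h2 : m ≤ (j : Int) := hmmin _ hjin
  omega

-- ===== VERDICT (by name: the statement is the Claim_ definition above) =====
theorem enforce_single_sentence_py_spec : Claim_equal_enforce_single_sentence_py := by
  intro text _
  unfold Spec_enforce_single_sentence_py enforce_single_sentence_py enforce_single_sentence_py_alt
  set s := PySem.Str.strip text with hs
  by_cases h0 : PySem.Str.len s = 0
  · simp only [h0, if_true]
  · simp only [h0, if_false]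
    cases hj : s.toList.findIdx? (fun c => c == '?' || c == '!' || c == '.') with
    | none =>
      have hall := List.findIdx?_eq_none_iff.mp hj
      have hnot : ∀ c : Char, (c == '?' || c == '!' || c == '.') = true → c ∉ s.toList := by
        intro c hc hmem
        have := hall c hmem
        rw [this] at hc
        exact Bool.noConfusion hc
      have hq : PySem.Chars.isIn ['?'] s.toList = false := by
        rw [PySem.Chars.isIn_eq_false_iff, List.singleton_infix_iff]
        exact hnot '?' (by decide)
      have he : PySem.Chars.isIn ['!'] s.toList = false := by
        rw [PySem.Chars.isIn_eq_false_iff, List.singleton_infix_iff]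
        exact hnot '!' (by decide)
      have hp : PySem.Chars.isIn ['.'] s.toList = false := by
        rw [PySem.Chars.isIn_eq_false_iff, List.singleton_infix_iff]
        exact hnot '.' (by decide)
      simp [hq, he, hp]
    | some j =>
      obtain ⟨hne, hmin⟩ := main_some s.toList j hj
      have hq : PySem.Str.isIn "?" s = PySem.Chars.isIn ['?'] s.toList := by
        rw [PySem.Str.isIn_eq]; rfl
      have he : PySem.Str.isIn "!" s = PySem.Chars.isIn ['!'] s.toList := by
        rw [PySem.Str.isIn_eq]; rfl
      have hp : PySem.Str.isIn "." s = PySem.Chars.isIn ['.'] s.toList := by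
        rw [PySem.Str.isIn_eq]; rfl
      have hfq : PySem.Str.find s "?" = PySem.Chars.find s.toList ['?'] := by
        rw [PySem.Str.find_eq]; rfl
      have hfe : PySem.Str.find s "!" = PySem.Chars.find s.toList ['!'] := by
        rw [PySem.Str.find_eq]; rfl
      have hfp : PySem.Str.find s "." = PySem.Chars.find s.toList ['.'] := by
        rw [PySem.Str.find_eq]; rfl
      simp only [hq, he, hp, hfq, hfe, hfp]
      rw [if_neg (by simpa [List.isEmpty_iff] using hne)]
      rw [hmin]
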